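-- pv_equiv track=rewrite | github.com/MichaelT0926/adventofcode2025 | Day 1/Day1_Puzzle2_Lock-Rotation-Expanded.py | upper_correction
-- ===== SOURCE A (Python) =====
-- def upper_correction(dial, counter):
--     #Function to correct an overflow
--
--     #Init variables
--     string_of_int = str(dial)
--     length_of_string = len(string_of_int)
--     counter_addition = ""
--
--     #Converted the int to a str to remove overflow, keeping removed digits to add to the counter
--     while length_of_string > 2:
--         counter_addition += string_of_int[0]
--         string_of_int = string_of_int.replace(string_of_int[0],"",1)
--         length_of_string = len(string_of_int)
--
--     #If the dial lands on 0 after correction, removes a count as it will be accounted for in rotate function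
--     if int(string_of_int) == 0:
--         counter -= 1
--
--     counter += int(counter_addition)
--     return (int(string_of_int), counter)
-- ===== SOURCE B (Python) =====
-- def upper_correction(dial, counter):
--     # Simpler: slice off all but the last two characters at once instead of
--     # stripping one character per loop iteration.
--     s = str(dial)
--     remaining = int(s[-2:])
--     removed = int(s[:-2])
--     if remaining == 0:
--         counter -= 1
--     return (remaining, counter + removed)
-- ===== Notes on version B (the rewrite author's own statement) =====
-- stated objective: simpler
-- what changed: Replaces the character-stripping while loop (repeated str.replace of the first char) with two direct string slices s[:-2]/s[-2:], keeping the same int() conversions and counter adjustment.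
import Mathlib
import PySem

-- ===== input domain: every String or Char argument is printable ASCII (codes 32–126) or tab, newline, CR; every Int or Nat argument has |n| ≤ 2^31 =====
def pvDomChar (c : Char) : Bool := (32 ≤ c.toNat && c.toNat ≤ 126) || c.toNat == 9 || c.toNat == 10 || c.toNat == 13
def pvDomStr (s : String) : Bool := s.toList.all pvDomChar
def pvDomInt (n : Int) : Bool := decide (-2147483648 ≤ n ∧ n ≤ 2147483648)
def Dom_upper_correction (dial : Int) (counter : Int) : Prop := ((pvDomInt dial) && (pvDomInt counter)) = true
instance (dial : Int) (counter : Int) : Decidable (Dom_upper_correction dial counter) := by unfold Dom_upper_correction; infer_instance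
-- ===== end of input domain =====

-- B replaces A's character-stripping while loop with two direct string slices (simpler, same values).


-- ===== PORT A =====
-- hand port of s.replace(c, "", 1) for a single-char old: remove the first occurrence of c (exact)
def pvReplace1 (s : List Char) (c : Char) : List Char :=
  match s with
  | [] => []
  | x :: rest => if x = c then rest else x :: pvReplace1 rest c

-- the while loop: while len(s) > 2: acc += s[0]; s = s.replace(s[0], "", 1)
def pvALoop (s acc : List Char) : List Char × List Char :=
  if s.length > 2 then
    match s with
    | [] => ([], acc)
    | x :: rest => pvALoop (pvReplace1 (x :: rest) x) (acc ++ [x])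
  else (s, acc)
termination_by s.length
decreasing_by simp [pvReplace1]

def upper_correction (dial : Int) (counter : Int) : Int × Int :=
  let s := PySem.Int.toChars dial
  let (rem, add) := pvALoop s []
  let remInt := (PySem.Int.ofChars? rem).getD 0      -- none = ValueError, excluded by Pre_
  let counter1 := if remInt = 0 then counter - 1 else counter
  let counter2 := counter1 + (PySem.Int.ofChars? add).getD 0   -- none = ValueError, excluded by Pre_
  (remInt, counter2)

-- ===== PORT B =====
def upper_correction_alt (dial : Int) (counter : Int) : Int × Int :=
  let s := PySem.Int.toChars dial
  let remaining := (PySem.Int.ofChars? (PySem.Chars.slice s (some (-2)) none)).getD 0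
  let removed := (PySem.Int.ofChars? (PySem.Chars.slice s none (some (-2)))).getD 0
  let counter' := if remaining = 0 then counter - 1 else counter
  (remaining, counter' + removed)

-- ===== PRECONDITION & SPEC =====
-- Pre_ excludes exactly -99 ≤ dial ≤ 99, where Python A raises ValueError
-- (int('') when |dial| ≤ 99 has at most 2 digits, int('-') for -99 ≤ dial ≤ -10).
def Pre_upper_correction (dial : Int) (counter : Int) : Prop :=
  dial ≤ -100 ∨ 100 ≤ dial
instance (dial : Int) (counter : Int) : Decidable (Pre_upper_correction dial counter) := by
  unfold Pre_upper_correction; infer_instance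
def pvWitness_upper_correction : Int × Int := (12345, 7)

def Spec_upper_correction (dial : Int) (counter : Int) (out : Int × Int) : Prop := out = upper_correction_alt dial counter
instance (dial : Int) (counter : Int) (out : Int × Int) : Decidable (Spec_upper_correction dial counter out) := by unfold Spec_upper_correction; infer_instance

-- ===== CLAIM (what is proved, stated in full; the proofs are below) =====
def Claim_equal_upper_correction : Prop := ∀ (dial : Int) (counter : Int), Dom_upper_correction dial counter → Pre_upper_correction dial counter → Spec_upper_correction dial counter (upper_correction dial counter)

-- ===== LEMMAS AND PROOFS =====

-- the loop strips the first s.length - 2 characters into the accumulator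
theorem pvALoop_eq (s acc : List Char) :
    pvALoop s acc = (s.drop (s.length - 2), acc ++ s.take (s.length - 2)) := by
  induction s generalizing acc with
  | nil => simp [pvALoop]
  | cons x rest ih =>
    rw [pvALoop]
    by_cases h : (x :: rest).length > 2
    · rw [if_pos h]
      simp only [pvReplace1, if_true]
      rw [ih]
      have h1 : (x :: rest).length - 2 = (rest.length - 2) + 1 := by simp at h ⊢; omega
      rw [h1, List.drop_succ_cons, List.take_succ_cons]
      simp
    · rw [if_neg h]
      have h3 : (x :: rest).length - 2 = 0 := by simp at h ⊢; omega
      rw [h3]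
      simp

-- ===== VERDICT (by name: the statement is the Claim_ definition above) =====
theorem upper_correction_spec : Claim_equal_upper_correction := by
  intro dial counter _ _
  unfold Spec_upper_correction upper_correction upper_correction_alt
  simp only [pvALoop_eq, PySem.Chars.slice_eq_listSlice,
      PySem.List.slice_from_neg_ofNat _ 2 (by omega),
      PySem.List.slice_to_neg_ofNat _ 2 (by omega), List.nil_append]
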